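-- pv_equiv track=rewrite | github.com/AI-lab-sh/Multi-agent-finance-analysis-by-langgraph | app/graph/nodes/recommend.py | highlight_recommendation
-- ===== SOURCE A (Python) =====
-- def highlight_recommendation(text: str) -> str:
--     """Highlight key recommendation words in HTML."""
--     highlights = {
--         "buy": '<span style="background-color:green;color:white;padding:2px 4px;border-radius:3px;">BUY</span>',
--         "sell": '<span style="background-color:red;color:white;padding:2px 4px;border-radius:3px;">SELL</span>',
--         "hold": '<span style="background-color:yellow;color:black;padding:2px 4px;border-radius:3px;">HOLD</span>',
--         "strong": '<span style="font-weight:bold;">STRONG</span>',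
--         "weak": '<span style="color:orange;">WEAK</span>',
--         "positive": '<span style="color:green;">POSITIVE</span>',
--         "negative": '<span style="color:red;">NEGATIVE</span>'
--     }
--
--     highlighted = text
--     for word, html in highlights.items():
--         highlighted = highlighted.replace(word.upper(), html)
--
--     return highlighted
-- ===== SOURCE B (Python) =====
-- # Single left-to-right scan over the text with a fixed uppercase-keyword table,
-- # instead of seven sequential whole-string str.replace passes.
-- _TABLE = [
--     ("BUY", '<span style="background-color:green;color:white;padding:2px 4px;border-radius:3px;">BUY</span>'),
--     ("SELL", '<span style="background-color:red;color:white;padding:2px 4px;border-radius:3px;">SELL</span>'),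
--     ("HOLD", '<span style="background-color:yellow;color:black;padding:2px 4px;border-radius:3px;">HOLD</span>'),
--     ("STRONG", '<span style="font-weight:bold;">STRONG</span>'),
--     ("WEAK", '<span style="color:orange;">WEAK</span>'),
--     ("POSITIVE", '<span style="color:green;">POSITIVE</span>'),
--     ("NEGATIVE", '<span style="color:red;">NEGATIVE</span>'),
-- ]
--
-- def highlight_recommendation(text: str) -> str:
--     """Highlight key recommendation words in HTML (one left-to-right pass)."""
--     out = []
--     i = 0
--     n = len(text)
--     while i < n:
--         for key, html in _TABLE:
--             if text.startswith(key, i):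
--                 out.append(html)
--                 i += len(key)
--                 break
--         else:
--             out.append(text[i])
--             i += 1
--     return "".join(out)
-- ===== Notes on version B (the rewrite author's own statement) =====
-- stated objective: alternative
-- what changed: A makes seven sequential whole-string str.replace passes (one per keyword); B keeps a fixed table of the uppercase keywords and makes a single left-to-right scan, at each position emitting the HTML span of the first matching keyword or copying the character.
import Mathlib
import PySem

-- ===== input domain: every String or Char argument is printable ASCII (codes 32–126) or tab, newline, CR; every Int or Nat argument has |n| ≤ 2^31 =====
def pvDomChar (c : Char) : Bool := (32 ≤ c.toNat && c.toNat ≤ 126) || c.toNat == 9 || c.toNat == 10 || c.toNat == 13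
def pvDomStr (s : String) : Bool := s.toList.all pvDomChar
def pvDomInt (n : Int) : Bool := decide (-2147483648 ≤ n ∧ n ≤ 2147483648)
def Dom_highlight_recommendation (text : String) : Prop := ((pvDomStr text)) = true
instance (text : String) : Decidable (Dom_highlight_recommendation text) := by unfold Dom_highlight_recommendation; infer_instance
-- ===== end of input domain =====

-- B replaces A's seven sequential whole-string .replace passes by ONE left-to-right scan over a
-- fixed uppercase-keyword table (alternative algorithm, same exact output).

-- ===== PORT A =====
-- the literal dict of Source A (lowercase keyword → HTML span)
def pvHl : List (String × String) := [
  ("buy", "<span style=\"background-color:green;color:white;padding:2px 4px;border-radius:3px;\">BUY</span>"),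
  ("sell", "<span style=\"background-color:red;color:white;padding:2px 4px;border-radius:3px;\">SELL</span>"),
  ("hold", "<span style=\"background-color:yellow;color:black;padding:2px 4px;border-radius:3px;\">HOLD</span>"),
  ("strong", "<span style=\"font-weight:bold;\">STRONG</span>"),
  ("weak", "<span style=\"color:orange;\">WEAK</span>"),
  ("positive", "<span style=\"color:green;\">POSITIVE</span>"),
  ("negative", "<span style=\"color:red;\">NEGATIVE</span>")]

-- for word, html in highlights.items(): highlighted = highlighted.replace(word.upper(), html)
def highlight_recommendation (text : String) : String :=
  pvHl.foldl (fun acc kv => PySem.Str.replace acc (PySem.Str.upper kv.1) kv.2) text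

-- ===== PORT B =====
-- the literal _TABLE of Source B (uppercase keyword → HTML span), as char lists
def pvTable : List (List Char × List Char) := [
  ("BUY".toList, "<span style=\"background-color:green;color:white;padding:2px 4px;border-radius:3px;\">BUY</span>".toList),
  ("SELL".toList, "<span style=\"background-color:red;color:white;padding:2px 4px;border-radius:3px;\">SELL</span>".toList),
  ("HOLD".toList, "<span style=\"background-color:yellow;color:black;padding:2px 4px;border-radius:3px;\">HOLD</span>".toList),
  ("STRONG".toList, "<span style=\"font-weight:bold;\">STRONG</span>".toList),
  ("WEAK".toList, "<span style=\"color:orange;\">WEAK</span>".toList),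
  ("POSITIVE".toList, "<span style=\"color:green;\">POSITIVE</span>".toList),
  ("NEGATIVE".toList, "<span style=\"color:red;\">NEGATIVE</span>".toList)]

-- the while/for-else scan of Source B: at each position take the first key of the table that matches
-- (text.startswith(key, i)), emit its html and skip len(key) chars, else copy one char.
-- advancing by len(key) over c :: t is written as dropping len(key) - 1 from t (keys are nonempty).
def pvScan : List Char → List Char
  | [] => []
  | c :: t =>
    match pvTable.find? (fun kv => kv.1.isPrefixOf (c :: t)) with
    | some kv => kv.2 ++ pvScan (t.drop (kv.1.length - 1))
    | none => c :: pvScan t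
termination_by l => l.length
decreasing_by
  · simp only [List.length_drop, List.length_cons]; omega
  · simp

def highlight_recommendation_alt (text : String) : String :=
  String.ofList (pvScan text.toList)

-- ===== PRECONDITION & SPEC =====
def Spec_highlight_recommendation (text : String) (out : String) : Prop := out = highlight_recommendation_alt text
instance (text : String) (out : String) : Decidable (Spec_highlight_recommendation text out) := by unfold Spec_highlight_recommendation; infer_instance

-- ===== CLAIM (what is proved, stated in full; the proofs are below) =====
def Claim_equal_highlight_recommendation : Prop := ∀ (text : String), Dom_highlight_recommendation text → Spec_highlight_recommendation text (highlight_recommendation text)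

-- ===== LEMMAS AND PROOFS =====

-- A's table with uppercased keys, as char lists, is exactly B's table
theorem pvUp1 : (PySem.Str.upper "buy").toList = "BUY".toList := by decide
theorem pvUp2 : (PySem.Str.upper "sell").toList = "SELL".toList := by decide
theorem pvUp3 : (PySem.Str.upper "hold").toList = "HOLD".toList := by decide
theorem pvUp4 : (PySem.Str.upper "strong").toList = "STRONG".toList := by decide
theorem pvUp5 : (PySem.Str.upper "weak").toList = "WEAK".toList := by decide
theorem pvUp6 : (PySem.Str.upper "positive").toList = "POSITIVE".toList := by decide
theorem pvUp7 : (PySem.Str.upper "negative").toList = "NEGATIVE".toList := by decide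

theorem pvHl_map_eq : pvHl.map (fun kv => ((PySem.Str.upper kv.1).toList, kv.2.toList)) = pvTable := by
  simp only [pvHl, pvTable, List.map_cons, List.map_nil, pvUp1, pvUp2, pvUp3, pvUp4, pvUp5, pvUp6, pvUp7]

-- simple structural form of Python's str.replace with nonempty pattern
-- (proved below to agree with PySem.Chars.replace)
def pvRepl (old new : List Char) : List Char → List Char
  | [] => []
  | c :: t =>
    if old.isPrefixOf (c :: t) then new ++ pvRepl old new (t.drop (old.length - 1))
    else c :: pvRepl old new t
termination_by l => l.length
decreasing_by
  · simp only [List.length_drop, List.length_cons]; omega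
  · simp

-- the scan restricted to the first k table entries
def pvScanK (k : Nat) : List Char → List Char
  | [] => []
  | c :: t =>
    match (pvTable.take k).find? (fun kv => kv.1.isPrefixOf (c :: t)) with
    | some kv => kv.2 ++ pvScanK k (t.drop (kv.1.length - 1))
    | none => c :: pvScanK k t
termination_by l => l.length
decreasing_by
  · simp only [List.length_drop, List.length_cons]; omega
  · simp

-- "pat cannot match starting inside a, whatever follows a"
def pvSafe (pat a : List Char) : Bool :=
  a.tails.all fun v => v.isEmpty ||
    (if pat.length ≤ v.length then !(pat.isPrefixOf v) else !(v.isPrefixOf pat))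

theorem pvRepl_cons (old new : List Char) (c : Char) (t : List Char) :
    pvRepl old new (c :: t) =
      if old.isPrefixOf (c :: t) then new ++ pvRepl old new (t.drop (old.length - 1))
      else c :: pvRepl old new t := by
  simp only [pvRepl]

theorem pvScanK_cons_some {k : Nat} {c : Char} {t : List Char} {kv : List Char × List Char}
    (hf : (pvTable.take k).find? (fun kv => kv.1.isPrefixOf (c :: t)) = some kv) :
    pvScanK k (c :: t) = kv.2 ++ pvScanK k (t.drop (kv.1.length - 1)) := by
  simp only [pvScanK]; rw [hf]

theorem pvScanK_cons_none {k : Nat} {c : Char} {t : List Char}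
    (hf : (pvTable.take k).find? (fun kv => kv.1.isPrefixOf (c :: t)) = none) :
    pvScanK k (c :: t) = c :: pvScanK k t := by
  simp only [pvScanK]; rw [hf]

theorem pvScan_cons_some {c : Char} {t : List Char} {kv : List Char × List Char}
    (hf : pvTable.find? (fun kv => kv.1.isPrefixOf (c :: t)) = some kv) :
    pvScan (c :: t) = kv.2 ++ pvScan (t.drop (kv.1.length - 1)) := by
  simp only [pvScan]; rw [hf]

theorem pvScan_cons_none {c : Char} {t : List Char}
    (hf : pvTable.find? (fun kv => kv.1.isPrefixOf (c :: t)) = none) :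
    pvScan (c :: t) = c :: pvScan t := by
  simp only [pvScan]; rw [hf]

theorem pvRepl_go_eq (old new : List Char) (hold : old ≠ []) :
    ∀ fuel l acc, l.length ≤ fuel →
      PySem.Chars.replace.go old new fuel l acc = acc.reverse ++ pvRepl old new l := by
  intro fuel
  induction fuel with
  | zero =>
    intro l acc hl
    have hnil : l = [] := by cases l <;> simp_all
    subst hnil
    simp [PySem.Chars.replace.go, pvRepl]
  | succ fuel ih =>
    intro l acc hl
    cases l with
    | nil => simp [PySem.Chars.replace.go, pvRepl]
    | cons c t =>
      obtain ⟨o, os, rfl⟩ : ∃ o os, old = o :: os := by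
        cases old with
        | nil => exact absurd rfl hold
        | cons o os => exact ⟨o, os, rfl⟩
      have hgo : PySem.Chars.replace.go (o :: os) new (fuel + 1) (c :: t) acc
          = if (o :: os).isPrefixOf (c :: t) then
              PySem.Chars.replace.go (o :: os) new fuel ((c :: t).drop (o :: os).length) (new.reverse ++ acc)
            else PySem.Chars.replace.go (o :: os) new fuel t (c :: acc) := rfl
      rw [hgo]
      by_cases hpre : (o :: os).isPrefixOf (c :: t) = true
      · rw [if_pos hpre]
        have hdrop : (c :: t).drop (o :: os).length = t.drop ((o :: os).length - 1) := by
          simp [List.length_cons]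
        rw [hdrop, ih _ _ (by simp at hl ⊢; omega)]
        simp only [pvRepl, hpre, if_true]
        simp [List.append_assoc]
      · rw [if_neg hpre, ih _ _ (by simp at hl ⊢; omega)]
        simp only [pvRepl, hpre]
        simp

theorem pvReplace_eq (old new s : List Char) (hold : old ≠ []) :
    PySem.Chars.replace s old new = pvRepl old new s := by
  have hne : old.isEmpty = false := by cases old <;> simp_all
  rw [PySem.Chars.replace, hne]
  simpa using pvRepl_go_eq old new hold s.length s [] le_rfl

theorem pvNotPrefix_append {p v x : List Char}
    (hs : (if p.length ≤ v.length then !(p.isPrefixOf v) else !(v.isPrefixOf p)) = true) :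
    p.isPrefixOf (v ++ x) = false := by
  rw [Bool.eq_false_iff]
  intro hpre
  rw [List.isPrefixOf_iff_prefix] at hpre
  split at hs
  · rename_i hlen
    have h : p <+: v := List.prefix_of_prefix_length_le hpre (List.prefix_append v x) hlen
    have h' := List.isPrefixOf_iff_prefix.mpr h
    simp [h'] at hs
  · rename_i hlen
    have h : v <+: p := List.prefix_of_prefix_length_le (List.prefix_append v x) hpre (by omega)
    have h' := List.isPrefixOf_iff_prefix.mpr h
    simp [h'] at hs

theorem pvSafe_cons {p : List Char} {c : Char} {a : List Char} (h : pvSafe p (c :: a) = true) :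
    pvSafe p a = true ∧
      (if p.length ≤ (c :: a).length then !(p.isPrefixOf (c :: a)) else !((c :: a).isPrefixOf p)) = true := by
  rw [pvSafe, List.tails_cons, List.all_cons, Bool.and_eq_true] at h
  refine ⟨h.2, ?_⟩
  have h1 := h.1
  simpa using h1

theorem pvRepl_append (p nw : List Char) :
    ∀ a, pvSafe p a = true → ∀ x, pvRepl p nw (a ++ x) = a ++ pvRepl p nw x := by
  intro a
  induction a with
  | nil => intro _ x; simp
  | cons c a' ih =>
    intro hs x
    obtain ⟨hs', hv⟩ := pvSafe_cons hs
    have hnp : p.isPrefixOf (c :: (a' ++ x)) = false := by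
      simpa using pvNotPrefix_append (x := x) hv
    rw [List.cons_append]
    simp only [pvRepl, hnp]
    simp only [Bool.false_eq_true, if_false]
    rw [ih hs' x]
    simp

theorem pvScanK_append (k : Nat) :
    ∀ a, (∀ kv ∈ pvTable.take k, pvSafe kv.1 a = true) →
      ∀ x, pvScanK k (a ++ x) = a ++ pvScanK k x := by
  intro a
  induction a with
  | nil => intro _ x; simp
  | cons c a' ih =>
    intro hs x
    have hnone : (pvTable.take k).find? (fun kv => kv.1.isPrefixOf (c :: (a' ++ x))) = none := by
      rw [List.find?_eq_none]
      intro kv hkv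
      have hv := (pvSafe_cons (hs kv hkv)).2
      have hnp := pvNotPrefix_append (x := x) hv
      rw [List.cons_append] at hnp
      simp [hnp]
    rw [List.cons_append, pvScanK_cons_none hnone]
    rw [ih (fun kv hkv => (pvSafe_cons (hs kv hkv)).1) x]
    simp

theorem pvHeads : ∀ kv ∈ pvTable, kv.2.head? = some '<' := by decide

theorem pvScanK_nocreate (k : Nat) (p : List Char) (hp : '<' ∉ p) :
    ∀ n l, l.length ≤ n → p.isPrefixOf (pvScanK k l) = true → p.isPrefixOf l = true := by
  intro n
  induction n generalizing p with
  | zero =>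
    intro l hl hpre
    have hnil : l = [] := by cases l <;> simp_all
    subst hnil
    simpa [pvScanK] using hpre
  | succ n ih =>
    intro l hl hpre
    cases l with
    | nil => simpa [pvScanK] using hpre
    | cons c t =>
      cases hf : (pvTable.take k).find? (fun kv => kv.1.isPrefixOf (c :: t)) with
      | some kv =>
        rw [pvScanK_cons_some hf] at hpre
        have hh := pvHeads kv (List.mem_of_mem_take (List.mem_of_find?_eq_some hf))
        cases p with
        | nil => simp [List.isPrefixOf]
        | cons q p' =>
          cases hkv2 : kv.2 with
          | nil => rw [hkv2] at hh; simp at hh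
          | cons d r =>
            rw [hkv2] at hh
            simp only [List.head?_cons, Option.some.injEq] at hh
            rw [hkv2, List.cons_append] at hpre
            have hstep : (q :: p').isPrefixOf (d :: (r ++ pvScanK k (t.drop (kv.1.length - 1))))
                = (q == d && p'.isPrefixOf (r ++ pvScanK k (t.drop (kv.1.length - 1)))) := rfl
            rw [hstep, Bool.and_eq_true, beq_iff_eq] at hpre
            have hq : q = '<' := hpre.1.trans hh
            exact absurd (show '<' ∈ q :: p' by simp [hq]) hp
      | none =>
        rw [pvScanK_cons_none hf] at hpre
        cases p with
        | nil => simp [List.isPrefixOf]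
        | cons q p' =>
          have hstep : (q :: p').isPrefixOf (c :: pvScanK k t)
              = (q == c && p'.isPrefixOf (pvScanK k t)) := rfl
          rw [hstep, Bool.and_eq_true, beq_iff_eq] at hpre
          have hp' : '<' ∉ p' := fun hm => hp (List.mem_cons_of_mem _ hm)
          have ht := ih p' hp' t (by simp at hl; omega) hpre.2
          have hgoal : (q :: p').isPrefixOf (c :: t) = (q == c && p'.isPrefixOf t) := rfl
          rw [hgoal, Bool.and_eq_true, beq_iff_eq]
          exact ⟨hpre.1, ht⟩

theorem pvScanK_zero : ∀ l, pvScanK 0 l = l := by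
  intro l
  induction l with
  | nil => simp [pvScanK]
  | cons c t ih => simp [pvScanK, ih]

theorem pvStep (k : Nat) (p hh : List Char) (hget : pvTable[k]? = some (p, hh))
    (hp0 : p ≠ []) (hplt : '<' ∉ p)
    (h1 : ∀ kv ∈ pvTable.take k, pvSafe p kv.2 = true)
    (h2 : ∀ kv ∈ pvTable.take k, pvSafe kv.1 (p.drop 1) = true) :
    ∀ n l, l.length ≤ n → pvRepl p hh (pvScanK k l) = pvScanK (k + 1) l := by
  have htk : pvTable.take (k + 1) = pvTable.take k ++ [(p, hh)] := by
    rw [List.take_succ, hget]; rfl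
  intro n
  induction n with
  | zero =>
    intro l hl
    have hnil : l = [] := by cases l <;> simp_all
    subst hnil
    simp [pvScanK, pvRepl]
  | succ n ih =>
    intro l hl
    cases l with
    | nil => simp [pvScanK, pvRepl]
    | cons c t =>
      cases hf : (pvTable.take k).find? (fun kv => kv.1.isPrefixOf (c :: t)) with
      | some kv =>
        have hmem := List.mem_of_find?_eq_some hf
        have hfk1 : (pvTable.take (k + 1)).find? (fun kv => kv.1.isPrefixOf (c :: t)) = some kv := by
          rw [htk, List.find?_append, hf]; rfl
        rw [pvScanK_cons_some hf, pvScanK_cons_some hfk1]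
        rw [pvRepl_append p hh kv.2 (h1 kv hmem)]
        congr 1
        exact ih _ (by simp at hl ⊢; omega)
      | none =>
        by_cases hp2 : p.isPrefixOf (c :: t) = true
        · obtain ⟨q, p', rfl⟩ : ∃ q p', p = q :: p' := by
            cases p with
            | nil => exact absurd rfl hp0
            | cons q p' => exact ⟨q, p', rfl⟩
          have hstep : (q :: p').isPrefixOf (c :: t) = (q == c && p'.isPrefixOf t) := rfl
          rw [hstep, Bool.and_eq_true, beq_iff_eq] at hp2
          obtain ⟨rfl, hp't⟩ := hp2
          obtain ⟨t2, rfl⟩ : ∃ t2, t = p' ++ t2 := by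
            obtain ⟨t2, ht2⟩ := List.isPrefixOf_iff_prefix.mp hp't
            exact ⟨t2, ht2.symm⟩
          have hself : (q :: p').isPrefixOf (q :: (p' ++ t2)) = true := by
            rw [List.isPrefixOf_iff_prefix]
            exact ⟨t2, by simp⟩
          have hfk1 : (pvTable.take (k + 1)).find? (fun kv => kv.1.isPrefixOf (q :: (p' ++ t2)))
              = some (q :: p', hh) := by
            rw [htk, List.find?_append, hf]
            simp only [Option.none_or, List.find?_cons]
            rw [hself]
          rw [pvScanK_cons_some hfk1, pvScanK_cons_none hf]
          simp only [List.length_cons, Nat.add_sub_cancel]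
          rw [List.drop_left]
          rw [pvScanK_append k p' (fun kv hkv => by simpa using h2 kv hkv) t2]
          have hpre2 : (q :: p').isPrefixOf (q :: (p' ++ pvScanK k t2)) = true := by
            rw [List.isPrefixOf_iff_prefix]
            exact ⟨pvScanK k t2, by simp⟩
          rw [pvRepl_cons, if_pos hpre2]
          simp only [List.length_cons, Nat.add_sub_cancel]
          rw [List.drop_left]
          congr 1
          exact ih t2 (by simp at hl; omega)
        · have hfk1 : (pvTable.take (k + 1)).find? (fun kv => kv.1.isPrefixOf (c :: t)) = none := by
            rw [htk, List.find?_append, hf]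
            simp [hp2]
          rw [pvScanK_cons_none hf, pvScanK_cons_none hfk1]
          have hnp : p.isPrefixOf (c :: pvScanK k t) = false := by
            rw [Bool.eq_false_iff]
            intro habs
            rw [← pvScanK_cons_none hf] at habs
            have := pvScanK_nocreate k p hplt (c :: t).length (c :: t) le_rfl habs
            simp [this] at hp2
          rw [pvRepl_cons, hnp]
          simp only [Bool.false_eq_true, if_false]
          rw [ih t (by simp at hl; omega)]

def pvSideOk (k : Nat) : Bool :=
  match pvTable[k]? with
  | some phh => !phh.1.isEmpty && !(phh.1.contains '<') &&
      ((pvTable.take k).all fun kv => pvSafe phh.1 kv.2 && pvSafe kv.1 (phh.1.drop 1))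
  | none => false

theorem pvSideAll : ((List.range 7).all fun k => pvSideOk k) = true := by decide

theorem pvChain : ∀ k, k ≤ 7 → ∀ l,
    (pvTable.take k).foldl (fun acc kv => pvRepl kv.1 kv.2 acc) l = pvScanK k l := by
  intro k
  induction k with
  | zero => intro _ l; simpa using (pvScanK_zero l).symm
  | succ k ih =>
    intro hk l
    have hk7 : k < 7 := by omega
    have hok : pvSideOk k = true := by
      have h := pvSideAll
      rw [List.all_eq_true] at h
      exact h k (List.mem_range.mpr hk7)
    cases hget : pvTable[k]? with
    | none => rw [pvSideOk, hget] at hok; simp at hok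
    | some phh =>
      obtain ⟨p, hh⟩ := phh
      rw [pvSideOk, hget] at hok
      simp only [Bool.and_eq_true, List.all_eq_true, Bool.not_eq_true'] at hok
      obtain ⟨⟨hne, hlt⟩, hall⟩ := hok
      have hp0 : p ≠ [] := by cases p <;> simp_all
      have hplt : '<' ∉ p := by
        intro hm
        rw [List.contains_eq_mem] at hlt
        simp [hm] at hlt
      have htk : pvTable.take (k + 1) = pvTable.take k ++ [(p, hh)] := by
        rw [List.take_succ, hget]; rfl
      rw [htk, List.foldl_append, ih (by omega) l]
      simp only [List.foldl_cons, List.foldl_nil]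
      exact pvStep k p hh hget hp0 hplt
        (fun kv hkv => ((hall kv hkv).1)) (fun kv hkv => ((hall kv hkv).2))
        l.length l le_rfl

theorem pvTake7 : pvTable.take 7 = pvTable := rfl

theorem pvScan_eq_scanK7 : ∀ n l, l.length ≤ n → pvScanK 7 l = pvScan l := by
  intro n
  induction n with
  | zero =>
    intro l hl
    have hnil : l = [] := by cases l <;> simp_all
    subst hnil
    simp [pvScanK, pvScan]
  | succ n ih =>
    intro l hl
    cases l with
    | nil => simp [pvScanK, pvScan]
    | cons c t =>
      cases hf : pvTable.find? (fun kv => kv.1.isPrefixOf (c :: t)) with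
      | some kv =>
        have hf7 : (pvTable.take 7).find? (fun kv => kv.1.isPrefixOf (c :: t)) = some kv := by
          rw [pvTake7, hf]
        rw [pvScanK_cons_some hf7, pvScan_cons_some hf]
        congr 1
        exact ih _ (by simp at hl ⊢; omega)
      | none =>
        have hf7 : (pvTable.take 7).find? (fun kv => kv.1.isPrefixOf (c :: t)) = none := by
          rw [pvTake7, hf]
        rw [pvScanK_cons_none hf7, pvScan_cons_none hf]
        rw [ih t (by simp at hl; omega)]

theorem pvTable_ne : ∀ kv ∈ pvTable, kv.1 ≠ [] := by decide

theorem pvFoldRepl : ∀ (ps : List (List Char × List Char)), (∀ kv ∈ ps, kv.1 ≠ []) → ∀ s,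
    ps.foldl (fun acc kv => PySem.Chars.replace acc kv.1 kv.2) s
      = ps.foldl (fun acc kv => pvRepl kv.1 kv.2 acc) s := by
  intro ps
  induction ps with
  | nil => intro _ s; rfl
  | cons kv ps ih =>
    intro h s
    simp only [List.foldl_cons]
    rw [pvReplace_eq kv.1 kv.2 s (h kv List.mem_cons_self)]
    exact ih (fun kv' h' => h kv' (List.mem_cons_of_mem _ h')) _

theorem pvFold_toList : ∀ (ps : List (String × String)) (s : String),
    (ps.foldl (fun acc kv => PySem.Str.replace acc (PySem.Str.upper kv.1) kv.2) s).toList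
      = (ps.map fun kv => ((PySem.Str.upper kv.1).toList, kv.2.toList)).foldl
          (fun acc kv => PySem.Chars.replace acc kv.1 kv.2) s.toList := by
  intro ps
  induction ps with
  | nil => intro s; rfl
  | cons kv ps ih =>
    intro s
    simp only [List.foldl_cons, List.map_cons]
    rw [ih, PySem.Str.toList_replace]

-- ===== VERDICT (by name: the statement is the Claim_ definition above) =====
theorem highlight_recommendation_spec : Claim_equal_highlight_recommendation := by
  intro text _
  unfold Spec_highlight_recommendation highlight_recommendation_alt
  have h1 : (highlight_recommendation text).toList = pvScan text.toList := by
    have hA : (highlight_recommendation text).toList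
        = pvTable.foldl (fun acc kv => PySem.Chars.replace acc kv.1 kv.2) text.toList := by
      rw [highlight_recommendation, pvFold_toList, pvHl_map_eq]
    rw [hA, pvFoldRepl pvTable pvTable_ne]
    have hc := pvChain 7 le_rfl text.toList
    rw [pvTake7] at hc
    rw [hc]
    exact pvScan_eq_scanK7 text.toList.length text.toList le_rfl
  calc highlight_recommendation text
      = String.ofList (highlight_recommendation text).toList := String.ofList_toList.symm
    _ = String.ofList (pvScan text.toList) := by rw [h1]
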